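-- pv_equiv track=rewrite | github.com/nahidazim/Python-Mid-Term | Mid_Term.py | format_booked_seats
-- ===== SOURCE A (Python) =====
-- def format_booked_seats(seats):
--     if not seats:
--         return ""
--
--     seat_strings = [f"({seat[0]},{seat[1]})" for seat in seats]
--     if len(seat_strings) == 1:
--         return seat_strings[0]
--     else:
--         return ', '.join(seat_strings[:-1]) + ' and ' + seat_strings[-1]
-- ===== SOURCE B (Python) =====
-- def format_booked_seats(seats):
--     out = ""
--     remaining = len(seats)
--     for row, col in seats:
--         remaining -= 1
--         if out:
--             out += " and " if remaining == 0 else ", "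
--         out += f"({row},{col})"
--     return out
-- ===== Notes on version B (the rewrite author's own statement) =====
-- stated objective: simpler
-- what changed: A formats every seat into a list, branches on its length, joins all but the last with ', ' via slicing and appends ' and ' plus the last; B makes one pass with a string accumulator and a countdown, choosing the separator (', ' or ' and ') in front of each seat as it goes, with no intermediate list, no slicing and no length-1 branch.
import Mathlib
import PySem

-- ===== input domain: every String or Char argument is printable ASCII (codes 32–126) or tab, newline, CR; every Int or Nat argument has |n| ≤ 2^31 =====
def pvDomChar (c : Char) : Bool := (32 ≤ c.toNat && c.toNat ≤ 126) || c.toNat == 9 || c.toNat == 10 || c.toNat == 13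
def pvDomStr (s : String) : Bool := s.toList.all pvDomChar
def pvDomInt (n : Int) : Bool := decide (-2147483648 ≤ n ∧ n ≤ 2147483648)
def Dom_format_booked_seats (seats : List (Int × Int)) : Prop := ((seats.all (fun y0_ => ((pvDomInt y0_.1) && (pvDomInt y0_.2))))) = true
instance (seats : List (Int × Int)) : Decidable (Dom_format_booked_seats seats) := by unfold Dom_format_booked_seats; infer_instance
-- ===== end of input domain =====

-- B replaces A's "format all seats, branch on length, join all-but-last and slice off the last"
-- by a single accumulator pass that inserts " and " before the final seat and ", " elsewhere (objective: simpler).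


-- f"({seat[0]},{seat[1]})" — the identical f-string appears in A and in B, so the helper is shared
def pvFmtSeat (seat : Int × Int) : String :=
  "(" ++ PySem.Int.toStr seat.1 ++ "," ++ PySem.Int.toStr seat.2 ++ ")"

-- ===== PORT A =====
def format_booked_seats (seats : List (Int × Int)) : String :=
  if seats.isEmpty then ""
  else
    let seat_strings := seats.map pvFmtSeat
    if seat_strings.length == 1 then
      PySem.List.pyGetD seat_strings 0 ""          -- seat_strings[0]; in range here (seats nonempty)
    else
      PySem.Str.join ", " (PySem.List.slice seat_strings none (some (-1)))
        ++ " and " ++ PySem.List.pyGetD seat_strings (-1) ""   -- seat_strings[-1]; in range here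

-- ===== PORT B =====
-- the for-loop of Source B: state = (out, remaining)
def pvLoopB : String → Int → List (Int × Int) → String
  | out, _, [] => out
  | out, remaining, s :: t =>
      let rem' := remaining - 1
      let out' := if out ≠ "" then out ++ (if rem' == 0 then " and " else ", ") else out
      pvLoopB (out' ++ pvFmtSeat s) rem' t

def format_booked_seats_alt (seats : List (Int × Int)) : String :=
  pvLoopB "" (PySem.List.len seats) seats

-- ===== PRECONDITION & SPEC =====
def Spec_format_booked_seats (seats : List (Int × Int)) (out : String) : Prop := out = format_booked_seats_alt seats
instance (seats : List (Int × Int)) (out : String) : Decidable (Spec_format_booked_seats seats out) := by unfold Spec_format_booked_seats; infer_instance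

-- ===== CLAIM (what is proved, stated in full; the proofs are below) =====
def Claim_equal_format_booked_seats : Prop := ∀ (seats : List (Int × Int)), Dom_format_booked_seats seats → Spec_format_booked_seats seats (format_booked_seats seats)

-- ===== LEMMAS AND PROOFS =====

-- the common recursive shape both ports are reduced to: head seat, then separator chosen by "is the next seat last"
def pvJ : (Int × Int) → List (Int × Int) → String
  | x, [] => pvFmtSeat x
  | x, y :: t => pvFmtSeat x ++ (if t.isEmpty then " and " else ", ") ++ pvJ y t

theorem append_ne_empty (s t : String) (h : s ≠ "") : s ++ t ≠ "" := by
  intro hc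
  have := congrArg String.toList hc
  simp at this
  exact h this.1

theorem pvLoopB_cons (out : String) (n : Int) (x : Int × Int) (t : List (Int × Int)) :
    pvLoopB out n (x :: t) =
      pvLoopB ((if out ≠ "" then out ++ (if (n - 1 == 0) then " and " else ", ") else out) ++ pvFmtSeat x) (n - 1) t := rfl

-- loop invariant of B with a nonempty accumulator
theorem pvLoopB_go (t : List (Int × Int)) : ∀ (x : Int × Int) (out : String), out ≠ "" →
    pvLoopB out ((t.length : Int) + 1) (x :: t) =
      out ++ (if t.isEmpty then " and " else ", ") ++ pvJ x t := by
  induction t with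
  | nil => intro x out h; simp [pvLoopB, pvJ, h]
  | cons y t' ih =>
    intro x out h
    rw [show ((y :: t').length : Int) + 1 = ((t'.length : Int) + 1) + 1 from by push_cast [List.length_cons]; ring,
        pvLoopB_cons, if_pos h, add_sub_cancel_right, if_neg (by simp; omega),
        ih y (out ++ ", " ++ pvFmtSeat x) (append_ne_empty _ _ (append_ne_empty _ _ h))]
    simp [pvJ, String.append_assoc]

theorem pvLoopB_start (t : List (Int × Int)) (x : Int × Int) :
    pvLoopB "" ((t.length : Int) + 1) (x :: t) = pvJ x t := by
  rw [pvLoopB_cons, if_neg (by simp), add_sub_cancel_right]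
  cases t with
  | nil => simp [pvLoopB, pvJ]
  | cons y t' =>
    rw [show ("" : String) ++ pvFmtSeat x = pvFmtSeat x from by
          apply String.toList_inj.mp; simp,
        show ((y :: t').length : Int) = (t'.length : Int) + 1 from by push_cast [List.length_cons]; ring,
        pvLoopB_go t' y (pvFmtSeat x) (by
          intro hc; have := congrArg String.toList hc; simp [pvFmtSeat] at this)]
    simp [pvJ]

theorem pyGetD_neg_one {α : Type} (xs : List α) (d : α) (h : xs ≠ []) :
    PySem.List.pyGetD xs (-1) d = xs.getLastD d := by
  simp [PySem.List.pyGetD, PySem.List.pyGet?, PySem.List.pyIdx?]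
  rw [if_pos (by cases xs with | nil => simp at h | cons a t => simp)]
  simp [List.getLast?_eq_getElem?]

-- A's join/slice expression equals the common recursive shape
theorem joinA_eq_pvJ (t : List (Int × Int)) : ∀ (x : Int × Int), t ≠ [] →
    PySem.Str.join ", " (((x :: t).map pvFmtSeat).dropLast) ++ " and "
        ++ ((x :: t).map pvFmtSeat).getLastD "" = pvJ x t := by
  induction t with
  | nil => simp
  | cons y t' ih =>
    intro x _
    cases t' with
    | nil =>
      apply String.toList_inj.mp
      simp [pvJ, PySem.Str.toList_join, PySem.Chars.join_singleton]
    | cons z t'' =>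
      have hgl : ((x :: y :: z :: t'').map pvFmtSeat).getLastD "" = ((y :: z :: t'').map pvFmtSeat).getLastD "" := by
        simp [List.getLastD]
      have hdl : ((x :: y :: z :: t'').map pvFmtSeat).dropLast
          = pvFmtSeat x :: ((y :: z :: t'').map pvFmtSeat).dropLast := by
        simp
      rw [hgl, hdl]
      rw [show PySem.Str.join ", " (pvFmtSeat x :: ((y :: z :: t'').map pvFmtSeat).dropLast)
          = pvFmtSeat x ++ ", " ++ PySem.Str.join ", " (((y :: z :: t'').map pvFmtSeat).dropLast) from by
        apply String.toList_inj.mp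
        simp [PySem.Str.toList_join, PySem.Chars.join_cons_cons]]
      rw [show pvJ x (y :: z :: t'') = pvFmtSeat x ++ ", " ++ pvJ y (z :: t'') from by simp [pvJ]]
      rw [← ih y (by simp)]
      simp [String.append_assoc]

-- ===== VERDICT (by name: the statement is the Claim_ definition above) =====
theorem format_booked_seats_spec : Claim_equal_format_booked_seats := by
  intro seats _
  unfold Spec_format_booked_seats format_booked_seats format_booked_seats_alt
  match seats with
  | [] => rfl
  | x :: t =>
    rw [show (PySem.List.len (x :: t)) = ((t.length : Int) + 1) by simp [PySem.List.len_eq],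
        pvLoopB_start]
    match t with
    | [] => simp [pvJ, PySem.List.pyGetD, PySem.List.pyGet?, PySem.List.pyIdx?]
    | y :: t' =>
      simp only [List.map_cons, List.length_cons]
      rw [if_neg (by simp), if_neg (by simp)]
      rw [show (pvFmtSeat x :: pvFmtSeat y :: List.map pvFmtSeat t') = (x :: y :: t').map pvFmtSeat from by simp,
          PySem.List.slice_to_neg_one, pyGetD_neg_one _ _ (by simp)]
      exact joinA_eq_pvJ (y :: t') x (by simp)
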